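-- pv_equiv track=rewrite | github.com/lowps/AspectGraphSentiment-Bert-GCN-Linguistic-Fusion-for-Aspect-Opinion-Sentiment-Triplet-Extraction | empirical/i_src/ii_data.py | get_evaluate_spans
-- ===== SOURCE A (Python) =====
-- def get_evaluate_spans(
--     tags: list, length: int, token_range: list[list[int]]
-- ) -> list:
--     """
--     Extracts evaluation spans from tokenized input based on a tagging scheme.
--
--     This function identifies continuous spans based on specific tag values and
--     returns the start and end indices of each span. It works with a custom tagging
--     scheme where:
--     - `1` indicates the beginning of an entity or span.
--     - `0` indicates the end or outside of an entity.
--     - `-1` indicates that the token should be ignored.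
--
--     Args:
--         tags (list): A list of tags associated with each token, where the value represents the
--                      state of the token (e.g., 1 for start of span, 0 for end, -1 for ignored).
--         length (int): The total length of the input sequence or number of tokens.
--         token_range (list of tuples) or (list of lists): A list of tuples, where each tuple `(l, r)` represents
--                                       the range of a token (e.g., (start_index, end_index)).
--
--     Returns:
--         list: A list of spans, where each span is a list of two integers [start, end],
--               representing the start and end indices of the identified entity or span.
--
--     Example:
--         >>> get_evaluate_spans([1, 0, -1, 1, 0], 5, [(0, 2), (3, 5)])
--         [[0, 1], [3, 4]]
--     """
--     spans = []
--     start = -1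
--     for i in range(length):
--         l, r = token_range[i]
--         if tags[l] == -1:
--             continue
--         elif tags[l] == 1:
--             if start != -1:
--                 spans.append([start, i - 1])
--             start = i
--         elif tags[l] == 0:
--             if start != -1:
--                 spans.append([start, i - 1])
--                 start = -1
--     if start != -1:
--         spans.append([start, length - 1])
--     return spans
-- ===== SOURCE B (Python) =====
-- def get_evaluate_spans(
--     tags: list, length: int, token_range: list[list[int]]
-- ) -> list:
--     # Effective tag per position, keeping A's unpack/indexing so exceptions match.
--     t = []
--     for i in range(length):
--         l, r = token_range[i]
--         t.append(tags[l])
--     # Boundary positions: exactly tag values 0 and 1 (others behave like -1).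
--     boundaries = [(i, v) for i, v in enumerate(t) if v == 0 or v == 1]
--     # Each 1-boundary opens a span that ends just before the next boundary
--     # (or at length - 1 if it is the last boundary).
--     ends = [b2 - 1 for b2, _ in boundaries[1:]] + [length - 1]
--     return [[b, e] for (b, v), e in zip(boundaries, ends) if v == 1]
-- ===== Notes on version B (the rewrite author's own statement) =====
-- stated objective: alternative
-- what changed: Replaces A's single-pass state machine with a running 'start' variable by a three-phase decomposition: materialise the effective tag per position, collect the boundary positions (tag 0 or 1), then zip each boundary with the next one so every 1-boundary's span end is read off directly (next boundary - 1, or length - 1 for the last boundary).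
import Mathlib
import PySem

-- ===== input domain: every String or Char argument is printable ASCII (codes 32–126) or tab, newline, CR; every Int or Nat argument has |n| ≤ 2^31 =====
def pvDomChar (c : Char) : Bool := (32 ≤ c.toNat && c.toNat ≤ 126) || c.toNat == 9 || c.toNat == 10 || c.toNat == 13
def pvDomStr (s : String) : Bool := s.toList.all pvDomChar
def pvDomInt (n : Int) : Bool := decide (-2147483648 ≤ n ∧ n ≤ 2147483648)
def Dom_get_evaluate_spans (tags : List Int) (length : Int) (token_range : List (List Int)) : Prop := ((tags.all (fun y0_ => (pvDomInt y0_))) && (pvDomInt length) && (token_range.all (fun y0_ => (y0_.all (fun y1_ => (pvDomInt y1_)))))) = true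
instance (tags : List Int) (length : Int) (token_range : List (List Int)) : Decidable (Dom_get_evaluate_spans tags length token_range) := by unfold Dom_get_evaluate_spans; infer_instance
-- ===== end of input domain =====

-- B replaces A's running-start state machine by a decomposition into phases:
-- materialise the effective tag per position, collect the boundary positions
-- (effective tag 0 or 1), then pair each boundary with the next one so every
-- 1-boundary's span end is read off directly (objective: alternative).

-- ===== PORT A =====
-- (pvEff is PORT B's helper; it is defined first only so that the pattern-match
-- auxiliaries which the two ports' list matches share are owned by the helper, not by A)
-- effective tag at position i; the fallback -1 stands in for the raising cases,
-- which Pre_get_evaluate_spans excludes.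
def pvEff (tags : List Int) (token_range : List (List Int)) (i : Int) : Int :=
  match PySem.List.pyGet? token_range i with
  | none => -1
  | some row =>
    match row with
    | [l, _r] => (PySem.List.pyGet? tags l).getD (-1)
    | _ => -1

-- literal port of A's loop; where Python would raise (token_range[i] / unpack / tags[l])
-- the pyGet?/shape match yields none / no 2-list and the state is left unchanged —
-- those inputs are excluded by Pre_get_evaluate_spans.
def get_evaluate_spans (tags : List Int) (length : Int) (token_range : List (List Int)) : List (List Int) :=
  -- state st = (spans, start)
  let step : (List (List Int) × Int) → Int → (List (List Int) × Int) := fun st i =>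
    match PySem.List.pyGet? token_range i with
    | some [l, _r] =>
      match PySem.List.pyGet? tags l with
      | some t =>
        if t = -1 then st
        else if t = 1 then
          ((if st.2 ≠ -1 then st.1 ++ [[st.2, i - 1]] else st.1), i)
        else if t = 0 then
          (if st.2 ≠ -1 then (st.1 ++ [[st.2, i - 1]], -1) else st)
        else st
      | none => st
    | _ => st
  let fin := (PySem.List.pyRange 0 length 1).foldl step ([], -1)
  if fin.2 ≠ -1 then fin.1 ++ [[fin.2, length - 1]] else fin.1

-- ===== PORT B =====
def get_evaluate_spans_alt (tags : List Int) (length : Int) (token_range : List (List Int)) : List (List Int) :=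
  let t : List Int :=
    (PySem.List.pyRange 0 length 1).foldl (fun acc i => acc ++ [pvEff tags token_range i]) []
  let boundaries : List (Int × Int) :=
    (PySem.List.enumerate t).filter (fun p => p.2 = 0 ∨ p.2 = 1)
  let ends : List Int := (boundaries.drop 1).map (fun p => p.1 - 1) ++ [length - 1]
  (boundaries.zip ends).filterMap (fun p => if p.1.2 = 1 then some [p.1.1, p.2] else none)

-- ===== PRECONDITION & SPEC =====
-- Pre_ excludes exactly the inputs where the Python raises: for some i in range(length),
-- token_range[i] is out of range (IndexError), is not a 2-element list (unpack ValueError),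
-- or its first element is an invalid index into tags (IndexError).
def Pre_get_evaluate_spans (tags : List Int) (length : Int) (token_range : List (List Int)) : Prop :=
  length ≤ (token_range.length : Int) ∧
  ∀ row ∈ token_range.take length.toNat,
    row.length = 2 ∧ PySem.Raise.InRange tags.length (row.headD 0)
instance (tags : List Int) (length : Int) (token_range : List (List Int)) : Decidable (Pre_get_evaluate_spans tags length token_range) := by unfold Pre_get_evaluate_spans; infer_instance

def pvWitness_get_evaluate_spans : List Int × Int × List (List Int) :=
  ([1, 0, -1, 1, 0], 3, [[0, 2], [3, 5], [2, 4]])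

def Spec_get_evaluate_spans (tags : List Int) (length : Int) (token_range : List (List Int)) (out : List (List Int)) : Prop := out = get_evaluate_spans_alt tags length token_range
instance (tags : List Int) (length : Int) (token_range : List (List Int)) (out : List (List Int)) : Decidable (Spec_get_evaluate_spans tags length token_range out) := by unfold Spec_get_evaluate_spans; infer_instance

-- ===== CLAIM (what is proved, stated in full; the proofs are below) =====
def Claim_equal_get_evaluate_spans : Prop := ∀ (tags : List Int) (length : Int) (token_range : List (List Int)), Dom_get_evaluate_spans tags length token_range → Pre_get_evaluate_spans tags length token_range → Spec_get_evaluate_spans tags length token_range (get_evaluate_spans tags length token_range)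

-- ===== LEMMAS AND PROOFS =====

-- pure state machine over (index, tag) pairs: A's loop body on precomputed tags
def pvStep (st : List (List Int) × Int) (p : Int × Int) : List (List Int) × Int :=
  if p.2 = 1 then ((if st.2 ≠ -1 then st.1 ++ [[st.2, p.1 - 1]] else st.1), p.1)
  else if p.2 = 0 then (if st.2 ≠ -1 then (st.1 ++ [[st.2, p.1 - 1]], -1) else st)
  else st

-- pure pairing over the boundary list: B's zip construction, structurally
def pvPair (bs : List (Int × Int)) (fin : Int) : List (List Int) :=
  match bs with
  | [] => []
  | (b, v) :: rest =>
    (if v = 1 then [[b, match rest with | [] => fin | (b2, _) :: _ => b2 - 1]] else [])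
      ++ pvPair rest fin

theorem pvMachine_eq_pair (fin : Int) :
    ∀ (ps : List (Int × Int)) (spans : List (List Int)) (start : Int),
      (∀ p ∈ ps, 0 ≤ p.1) → (start = -1 ∨ 0 ≤ start) →
      (if (ps.foldl pvStep (spans, start)).2 ≠ -1 then
        (ps.foldl pvStep (spans, start)).1 ++ [[(ps.foldl pvStep (spans, start)).2, fin]]
       else (ps.foldl pvStep (spans, start)).1) =
      spans ++
        (if start = -1 then []
         else [[start, match ps.filter (fun p => p.2 = 0 ∨ p.2 = 1) with
                       | [] => fin | (b, _) :: _ => b - 1]]) ++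
        pvPair (ps.filter (fun p => p.2 = 0 ∨ p.2 = 1)) fin := by
  intro ps
  induction ps with
  | nil =>
    intro spans start _ _
    simp [pvPair]
    by_cases h : start = -1 <;> simp [h]
  | cons p rest ih =>
    intro spans start hpos hst
    obtain ⟨b, v⟩ := p
    have hp : (0:Int) ≤ b := hpos (b, v) (List.mem_cons_self ..)
    have hrest : ∀ q ∈ rest, 0 ≤ q.1 := fun q hq => hpos q (List.mem_cons_of_mem _ hq)
    simp only [List.foldl_cons]
    by_cases hv1 : v = 1
    · subst hv1
      have hb : b ≠ -1 := by omega
      have hstep : pvStep (spans, start) (b, 1)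
          = ((if start ≠ -1 then spans ++ [[start, b - 1]] else spans), b) := by
        simp [pvStep]
      rw [hstep, ih _ b hrest (Or.inr hp), List.filter_cons_of_pos (by simp)]
      cases hfr : rest.filter (fun p => decide (p.2 = 0 ∨ p.2 = 1)) with
      | nil => by_cases h : start = -1 <;> simp [pvPair, h, hb]
      | cons q tl =>
        obtain ⟨b2, v2⟩ := q
        by_cases h : start = -1 <;> simp [pvPair, h, hb]
    · by_cases hv0 : v = 0
      · subst hv0
        have hstep : pvStep (spans, start) (b, 0)
            = ((if start ≠ -1 then spans ++ [[start, b - 1]] else spans), -1) := by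
          by_cases h : start = -1 <;> simp [pvStep, h]
        rw [hstep, ih _ (-1) hrest (Or.inl rfl), List.filter_cons_of_pos (by simp)]
        by_cases h : start = -1 <;> simp [pvPair, h]
      · have hstep : pvStep (spans, start) (b, v) = (spans, start) := by
          simp [pvStep, hv0, hv1]
        rw [hstep, ih spans start hrest hst, List.filter_cons_of_neg (by simp [hv0, hv1])]

-- A's port is the pure machine on the effective-tag pairs
theorem pvA_eq_machine (tags : List Int) (length : Int) (token_range : List (List Int)) :
    get_evaluate_spans tags length token_range =
      (if (((PySem.List.pyRange 0 length 1).map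
              (fun i => (i, pvEff tags token_range i))).foldl pvStep ([], -1)).2 ≠ -1 then
        (((PySem.List.pyRange 0 length 1).map
            (fun i => (i, pvEff tags token_range i))).foldl pvStep ([], -1)).1
          ++ [[(((PySem.List.pyRange 0 length 1).map
                  (fun i => (i, pvEff tags token_range i))).foldl pvStep ([], -1)).2, length - 1]]
       else (((PySem.List.pyRange 0 length 1).map
                (fun i => (i, pvEff tags token_range i))).foldl pvStep ([], -1)).1) := by
  simp only [get_evaluate_spans]
  rw [List.foldl_map]
  have hf : ∀ (st : List (List Int) × Int), ∀ i ∈ PySem.List.pyRange 0 length 1,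
      (fun (st : List (List Int) × Int) i =>
        match PySem.List.pyGet? token_range i with
        | some [l, _r] =>
          match PySem.List.pyGet? tags l with
          | some t =>
            if t = -1 then st
            else if t = 1 then
              ((if st.2 ≠ -1 then st.1 ++ [[st.2, i - 1]] else st.1), i)
            else if t = 0 then
              (if st.2 ≠ -1 then (st.1 ++ [[st.2, i - 1]], -1) else st)
            else st
          | none => st
        | _ => st) st i = pvStep st (i, pvEff tags token_range i) := by
    intro st i _
    obtain ⟨spans, start⟩ := st
    unfold pvEff pvStep
    rcases hg : PySem.List.pyGet? token_range i with _ | row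
    · simp [hg]
    · rcases row with _ | ⟨l, _ | ⟨r, _ | _⟩⟩
      · simp [hg]
      · simp [hg]
      · rcases ht : PySem.List.pyGet? tags l with _ | t
        · simp [hg, ht]
        · by_cases h1 : t = -1
          · simp [hg, ht, h1]
          · by_cases h2 : t = 1 <;> by_cases h3 : t = 0 <;> simp_all
      · simp [hg]
  rw [List.foldl_ext _ (fun st i => pvStep st (i, pvEff tags token_range i)) ([], -1) hf]

-- B's boundary list is the filter of the effective-tag pairs
theorem pvB_boundaries (tags : List Int) (length : Int) (token_range : List (List Int)) :
    PySem.List.enumerate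
        ((PySem.List.pyRange 0 length 1).foldl
          (fun acc i => acc ++ [pvEff tags token_range i]) []) =
      (PySem.List.pyRange 0 length 1).map (fun i => (i, pvEff tags token_range i)) := by
  rw [PySem.List.foldl_append_singleton_eq_map, List.nil_append,
      PySem.List.enumerate_eq_map_pyRange _ (-1)]
  by_cases hn : 0 ≤ length
  · have h1 : PySem.List.len ((PySem.List.pyRange 0 length 1).map (pvEff tags token_range))
        = length := by
      simp [PySem.List.len, PySem.List.length_pyRange_one]
      omega
    rw [h1]
    apply List.map_congr_left
    intro j hj
    obtain ⟨h0, hl⟩ := PySem.List.mem_pyRange_one.mp hj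
    rw [PySem.List.pyGetD_map_pyRange_of_nonneg _ _ _ _ h0 hl]
  · rw [PySem.List.pyRange_one_eq_nil (by omega : length ≤ 0)]
    simp [PySem.List.len]

-- B's zip-with-next construction is the structural pairing
theorem pvZip_eq_pair (bs : List (Int × Int)) (fin : Int) :
    (bs.zip ((bs.drop 1).map (fun p => p.1 - 1) ++ [fin])).filterMap
        (fun p => if p.1.2 = 1 then some [p.1.1, p.2] else none) =
      pvPair bs fin := by
  induction bs with
  | nil => simp [pvPair]
  | cons p rest ih =>
    obtain ⟨b, v⟩ := p
    cases rest with
    | nil => by_cases h : v = 1 <;> simp [pvPair, h]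
    | cons q rest' =>
      simp only [List.drop_succ_cons, List.drop_zero] at ih ⊢
      by_cases h : v = 1 <;> simp [pvPair, h, List.zip_cons_cons, ih]

-- ===== VERDICT (by name: the statement is the Claim_ definition above) =====
theorem get_evaluate_spans_spec : Claim_equal_get_evaluate_spans := by
  intro tags length token_range _ _
  unfold Spec_get_evaluate_spans
  rw [pvA_eq_machine]
  simp only [get_evaluate_spans_alt]
  rw [pvB_boundaries, pvZip_eq_pair]
  have hpos : ∀ p ∈ (PySem.List.pyRange 0 length 1).map
      (fun i => (i, pvEff tags token_range i)), (0:Int) ≤ p.1 := by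
    intro p hp
    obtain ⟨i, hi, rfl⟩ := List.mem_map.mp hp
    exact (PySem.List.mem_pyRange_one.mp hi).1
  rw [pvMachine_eq_pair (length - 1) _ [] (-1) hpos (Or.inl rfl)]
  simp
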